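-- pv_equiv track=rewrite | github.com/felipelouzeiro/restaurant-orders-python | src/analyze_log.py | days_not_frequented_by_joao
-- ===== SOURCE A (Python) =====
-- def days_not_frequented_by_joao(data):
--     days_of_week = set(item["day_of_the_week"] for item in data)
--     days = set()
--     for order in data:
--         if order["name"] == "joao":
--             days.add(order["day_of_the_week"])
--     days_not_frequented = days_of_week.difference(days)
--     return days_not_frequented
-- ===== SOURCE B (Python) =====
-- def days_not_frequented_by_joao(data):
--     by_day = {}
--     for order in data:
--         by_day.setdefault(order["day_of_the_week"], set()).add(order["name"])
--     return {day for day, names in by_day.items() if "joao" not in names}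
-- ===== Notes on version B (the rewrite author's own statement) =====
-- stated objective: alternative
-- what changed: Instead of building a set of all days plus a set of joao's days and taking their difference, B groups the names seen on each day into a dict in one pass and keeps the days whose name-set lacks 'joao'.
import Mathlib
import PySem

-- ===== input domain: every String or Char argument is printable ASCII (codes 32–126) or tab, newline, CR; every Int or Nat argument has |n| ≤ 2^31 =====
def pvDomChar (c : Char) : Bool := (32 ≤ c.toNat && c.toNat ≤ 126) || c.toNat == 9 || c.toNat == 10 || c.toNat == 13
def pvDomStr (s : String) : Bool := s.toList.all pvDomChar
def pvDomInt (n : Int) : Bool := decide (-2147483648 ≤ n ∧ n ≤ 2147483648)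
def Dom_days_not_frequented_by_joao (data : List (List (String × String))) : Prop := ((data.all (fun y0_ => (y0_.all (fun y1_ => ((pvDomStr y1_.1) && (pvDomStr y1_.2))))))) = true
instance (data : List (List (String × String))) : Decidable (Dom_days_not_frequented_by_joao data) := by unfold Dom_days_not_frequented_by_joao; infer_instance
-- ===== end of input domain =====

-- B groups the names seen on each day into a dict in one pass and keeps the days whose
-- name-set does not contain "joao", instead of A's set-of-all-days minus set-of-joao-days.
-- item["k"] is ported as Dict.getD with default "": exact under Pre_, which requires both keys
-- to be present in every order (Python raises KeyError otherwise).

-- ===== PORT A =====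
def pvDay (o : List (String × String)) : String := (PySem.Dict.mk o).getD "day_of_the_week" ""
def pvName (o : List (String × String)) : String := (PySem.Dict.mk o).getD "name" ""

def days_not_frequented_by_joao (data : List (List (String × String))) : List String :=
  let days_of_week : PySem.Set String := PySem.Set.ofList (data.map (fun item => pvDay item))
  let days : PySem.Set String :=
    data.foldl (fun days order =>
      if pvName order == "joao" then PySem.Set.add days (pvDay order) else days)
      PySem.Set.empty
  PySem.Set.diff days_of_week days

-- ===== PORT B =====
def days_not_frequented_by_joao_alt (data : List (List (String × String))) : List String :=
  let by_day : PySem.Dict String (PySem.Set String) :=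
    data.foldl (fun d order =>
      d.insert (pvDay order) (PySem.Set.add (d.getD (pvDay order) PySem.Set.empty) (pvName order)))
      PySem.Dict.empty
  ((by_day.items.filter (fun p => !(PySem.Set.contains p.2 "joao"))).map (fun p => p.1))

-- ===== PRECONDITION & SPEC =====
-- Pre_ excludes exactly the inputs where Python's item["day_of_the_week"] / order["name"] raises KeyError.
def Pre_days_not_frequented_by_joao (data : List (List (String × String))) : Prop :=
  (data.all (fun item => (PySem.Dict.mk item).contains "day_of_the_week" && (PySem.Dict.mk item).contains "name")) = true
instance (data : List (List (String × String))) : Decidable (Pre_days_not_frequented_by_joao data) := by unfold Pre_days_not_frequented_by_joao; infer_instance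
def pvWitness_days_not_frequented_by_joao : (List (List (String × String))) :=
  [[("day_of_the_week", "mon"), ("name", "ana")], [("day_of_the_week", "tue"), ("name", "joao")]]

def Spec_days_not_frequented_by_joao (data : List (List (String × String))) (out : List String) : Prop := out = days_not_frequented_by_joao_alt data
instance (data : List (List (String × String))) (out : List String) : Decidable (Spec_days_not_frequented_by_joao data out) := by unfold Spec_days_not_frequented_by_joao; infer_instance

-- ===== CLAIM (what is proved, stated in full; the proofs are below) =====
def Claim_equal_days_not_frequented_by_joao : Prop := ∀ (data : List (List (String × String))), Dom_days_not_frequented_by_joao data → Pre_days_not_frequented_by_joao data → Spec_days_not_frequented_by_joao data (days_not_frequented_by_joao data)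

-- ===== LEMMAS AND PROOFS =====

-- membership in A's joao-days accumulator
theorem mem_joao_fold (data : List (List (String × String)))
    (s : PySem.Set String) (x : String) :
    x ∈ data.foldl (fun days order =>
      if pvName order == "joao" then PySem.Set.add days (pvDay order) else days) s ↔
    x ∈ s ∨ ∃ o ∈ data, pvName o = "joao" ∧ pvDay o = x := by
  induction data generalizing s with
  | nil => simp
  | cons o rest ih =>
    simp only [List.foldl_cons, ih]
    by_cases h : pvName o = "joao"
    · simp [h, PySem.Set.mem_add]; tauto
    · simp [h]

-- value at key k of B's grouping dict
theorem mem_getD_group_fold (data : List (List (String × String)))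
    (d : PySem.Dict String (PySem.Set String)) (k x : String) :
    x ∈ (data.foldl (fun d order =>
        d.insert (pvDay order) (PySem.Set.add (d.getD (pvDay order) PySem.Set.empty) (pvName order))) d).getD k PySem.Set.empty ↔
    x ∈ d.getD k PySem.Set.empty ∨ ∃ o ∈ data, pvDay o = k ∧ pvName o = x := by
  induction data generalizing d with
  | nil => simp
  | cons o rest ih =>
    simp only [List.foldl_cons, ih, PySem.Dict.getD_insert]
    by_cases h : k = pvDay o <;> simp [h, PySem.Set.mem_add] <;> tauto

-- ===== VERDICT (by name: the statement is the Claim_ definition above) =====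
theorem days_not_frequented_by_joao_spec : Claim_equal_days_not_frequented_by_joao := by
  intro data _ _
  show days_not_frequented_by_joao data = days_not_frequented_by_joao_alt data
  have hnd : (data.foldl (fun d order =>
      d.insert (pvDay order) (PySem.Set.add (d.getD (pvDay order) PySem.Set.empty) (pvName order)))
      PySem.Dict.empty).keys.Nodup :=
    PySem.Dict.nodup_keys_foldl_insert_key data pvDay _ _ PySem.Dict.nodup_keys_empty
  have hkeys : (data.foldl (fun d order =>
      d.insert (pvDay order) (PySem.Set.add (d.getD (pvDay order) PySem.Set.empty) (pvName order)))
      PySem.Dict.empty).keys = PySem.Set.ofList (data.map pvDay) := by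
    rw [PySem.Dict.keys_foldl_insert_key]
    simp [PySem.Dict.keys_empty, PySem.Set.update_nil_left]
  simp only [days_not_frequented_by_joao, days_not_frequented_by_joao_alt,
    PySem.Dict.items_eq_map_keys _ hnd PySem.Set.empty, List.filter_map, List.map_map, hkeys]
  simp only [Function.comp_def, List.map_id']
  rw [PySem.Set.diff]
  refine (List.filter_congr ?_).symm
  intro k _
  congr 1
  rw [Bool.eq_iff_iff, PySem.Set.contains_iff, PySem.Set.contains_iff,
    mem_joao_fold, mem_getD_group_fold]
  simp only [PySem.Dict.getD_empty]
  simp only [show (PySem.Set.empty : PySem.Set String) = [] from rfl, List.not_mem_nil, false_or]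
  constructor <;> rintro ⟨o, ho, h1, h2⟩ <;> exact ⟨o, ho, h2, h1⟩
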